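-- pv_equiv track=rewrite | github.com/mpettersson/PythonReview | questions/list/has_three_sum.py | has_three_sum_set
-- ===== SOURCE A (Python) =====
-- def has_three_sum_set(l, t):
--     if l and t is not None:
--         elements = set(l)
--         for x in elements:
--             for y in elements:
--                 z = t - x - y
--                 if z in elements:
--                     return True
--     return False
-- ===== SOURCE B (Python) =====
-- def has_three_sum_set(l, t):
--     if l and t is not None:
--         arr = sorted(set(l))
--         n = len(arr)
--         for x in arr:
--             target = t - x
--             left, right = 0, n - 1
--             while left <= right:
--                 s = arr[left] + arr[right]
--                 if s == target:
--                     return True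
--                 if s < target:
--                     left += 1
--                 else:
--                     right -= 1
--     return False
-- ===== Notes on version B (the rewrite author's own statement) =====
-- stated objective: alternative
-- what changed: Replaces the double loop over the set with a hash-membership probe per pair by sorting the distinct values and running a two-pointer pair search for each outer element.
import Mathlib
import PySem

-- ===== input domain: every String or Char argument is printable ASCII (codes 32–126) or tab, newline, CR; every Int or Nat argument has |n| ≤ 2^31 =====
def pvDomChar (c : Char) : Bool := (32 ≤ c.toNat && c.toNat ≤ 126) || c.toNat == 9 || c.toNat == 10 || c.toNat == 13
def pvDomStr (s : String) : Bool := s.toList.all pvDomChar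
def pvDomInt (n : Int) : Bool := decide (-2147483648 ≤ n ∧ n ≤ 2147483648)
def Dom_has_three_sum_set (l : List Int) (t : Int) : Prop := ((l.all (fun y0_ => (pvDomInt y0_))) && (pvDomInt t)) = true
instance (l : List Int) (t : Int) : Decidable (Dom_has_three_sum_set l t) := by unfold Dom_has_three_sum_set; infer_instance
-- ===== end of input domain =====

-- B replaces the double loop over the set (with a membership probe per pair) by sorting the
-- distinct values and running a two-pointer pair search per outer element (objective: alternative algorithm, same result).

-- ===== PORT A =====
-- for x in elements: for y in elements: if (t-x-y) in elements: return True  — the result is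
-- order-independent (a bool 'any'), so iterating the Set's list is exact.
def has_three_sum_set (l : List Int) (t : Int) : Bool :=
  if l ≠ [] then
    let elements : PySem.Set Int := PySem.Set.ofList l
    elements.any (fun x => elements.any (fun y => PySem.Set.contains elements (t - x - y)))
  else false

-- ===== PORT B =====
-- while left <= right: s = arr[left] + arr[right]; …  (indices stay in range, so pyGetD is exact;
-- the Nat fuel (right+1-left).toNat only makes the loop total — it never cuts a real iteration short)
def pvTwoPointerGo (arr : List Int) (target : Int) : Nat → Int → Int → Bool
  | 0, _, _ => false
  | n + 1, left, right =>
    if left ≤ right then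
      if PySem.List.pyGetD arr left 0 + PySem.List.pyGetD arr right 0 = target then true
      else if PySem.List.pyGetD arr left 0 + PySem.List.pyGetD arr right 0 < target then
        pvTwoPointerGo arr target n (left + 1) right
      else pvTwoPointerGo arr target n left (right - 1)
    else false

def pvTwoPointer (arr : List Int) (target : Int) (left right : Int) : Bool :=
  pvTwoPointerGo arr target (right + 1 - left).toNat left right

def has_three_sum_set_alt (l : List Int) (t : Int) : Bool :=
  if l ≠ [] then
    let arr := PySem.List.sorted (PySem.Set.ofList l) (fun x => x) false
    arr.any (fun x => pvTwoPointer arr (t - x) 0 ((arr.length : Int) - 1))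
  else false

-- ===== PRECONDITION & SPEC =====
def Spec_has_three_sum_set (l : List Int) (t : Int) (out : Bool) : Prop := out = has_three_sum_set_alt l t
instance (l : List Int) (t : Int) (out : Bool) : Decidable (Spec_has_three_sum_set l t out) := by unfold Spec_has_three_sum_set; infer_instance

-- ===== CLAIM (what is proved, stated in full; the proofs are below) =====
def Claim_equal_has_three_sum_set : Prop := ∀ (l : List Int) (t : Int), Dom_has_three_sum_set l t → Spec_has_three_sum_set l t (has_three_sum_set l t)

-- ===== LEMMAS AND PROOFS =====

-- A returns true iff three (not necessarily distinct) values of l sum to t.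
theorem pvA_iff (l : List Int) (t : Int) :
    has_three_sum_set l t = true ↔ l ≠ [] ∧ ∃ x ∈ l, ∃ y ∈ l, ∃ z ∈ l, x + y + z = t := by
  simp only [has_three_sum_set]
  split
  · rename_i hl
    simp only [List.any_eq_true, PySem.Set.contains_iff, PySem.Set.mem_ofList]
    constructor
    · rintro ⟨x, hx, y, hy, hz⟩
      exact ⟨hl, x, hx, y, hy, t - x - y, hz, by ring⟩
    · rintro ⟨-, x, hx, y, hy, z, hz, hsum⟩
      refine ⟨x, hx, y, hy, ?_⟩
      have hzz : t - x - y = z := by omega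
      rw [hzz]; exact hz
  · rename_i hl
    simp at hl
    simp [hl]

-- Two-pointer correctness on a (≤-)sorted list.
theorem pvGo_iff (arr : List Int) (hs : arr.Pairwise (· ≤ ·)) (target : Int) :
    ∀ (n : Nat) (left right : Int), 0 ≤ left → right < (arr.length : Int) →
      (right + 1 - left).toNat ≤ n →
      (pvTwoPointerGo arr target n left right = true ↔
        ∃ (i j : Nat) (hi : i < arr.length) (hj : j < arr.length),
          left ≤ (i : Int) ∧ i ≤ j ∧ (j : Int) ≤ right ∧ arr[i]'hi + arr[j]'hj = target) := by
  have mono : ∀ (i j : Nat) (hi : i < arr.length) (hj : j < arr.length), i ≤ j →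
      arr[i]'hi ≤ arr[j]'hj := by
    intro i j hi hj hij
    rcases Nat.lt_or_eq_of_le hij with h | h
    · exact List.pairwise_iff_getElem.mp hs i j hi hj h
    · subst h; rfl
  intro n
  induction n with
  | zero =>
    intro left right hl hr hf
    constructor
    · intro hfalse; exact absurd hfalse (by simp [pvTwoPointerGo])
    · rintro ⟨i, j, hi, hj, h1, h2, h3, -⟩; omega
  | succ n ih =>
    intro left right hl hr hf
    show (if left ≤ right then _ else false) = true ↔ _
    by_cases h : left ≤ right
    · rw [if_pos h]
      by_cases hNe : PySem.List.pyGetD arr left 0 + PySem.List.pyGetD arr right 0 = target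
      · rw [if_pos hNe]
        have hrn : right.toNat < arr.length := by omega
        have hln : left.toNat < arr.length := by omega
        refine ⟨fun _ => ⟨left.toNat, right.toNat, hln, hrn, by omega, by omega, by omega, ?_⟩,
          fun _ => rfl⟩
        have e1 : PySem.List.pyGetD arr left 0 = arr[left.toNat] :=
          PySem.List.pyGetD_eq_getElem arr (i := left) 0 hl (by omega)
        have e2 : PySem.List.pyGetD arr right 0 = arr[right.toNat] :=
          PySem.List.pyGetD_eq_getElem arr (i := right) 0 (by omega) (by omega)
        rw [e1, e2] at hNe; exact hNe
      · rw [if_neg hNe]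
        by_cases hLt : PySem.List.pyGetD arr left 0 + PySem.List.pyGetD arr right 0 < target
        · rw [if_pos hLt]
          refine Iff.trans (ih (left + 1) right (by omega) hr (by omega)) ⟨?_, ?_⟩
          · rintro ⟨i, j, hi, hj, h1, h2, h3, hsum⟩
            exact ⟨i, j, hi, hj, by omega, h2, h3, hsum⟩
          · rintro ⟨i, j, hi, hj, h1, h2, h3, hsum⟩
            refine ⟨i, j, hi, hj, ?_, h2, h3, hsum⟩
            -- i cannot be left: arr[left] + arr[j] ≤ arr[left] + arr[right] < target
            by_contra hcon
            have he1 : PySem.List.pyGetD arr left 0 = arr[i]'hi := by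
              rw [PySem.List.pyGetD_eq_getElem arr (i := left) 0 hl (by omega)]
              congr 1; omega
            have hm2 : PySem.List.pyGetD arr right 0 ≥ arr[j]'hj := by
              rw [PySem.List.pyGetD_eq_getElem arr (i := right) 0 (by omega) (by omega)]
              exact mono j right.toNat hj (by omega) (by omega)
            rw [he1] at hLt
            omega
        · rw [if_neg hLt]
          refine Iff.trans (ih left (right - 1) hl (by omega) (by omega)) ⟨?_, ?_⟩
          · rintro ⟨i, j, hi, hj, h1, h2, h3, hsum⟩
            exact ⟨i, j, hi, hj, h1, h2, by omega, hsum⟩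
          · rintro ⟨i, j, hi, hj, h1, h2, h3, hsum⟩
            refine ⟨i, j, hi, hj, h1, h2, ?_, hsum⟩
            -- j cannot be right: arr[i] + arr[right] ≥ arr[left] + arr[right] > target
            by_contra hcon
            have hm2 : PySem.List.pyGetD arr left 0 ≤ arr[i]'hi := by
              rw [PySem.List.pyGetD_eq_getElem arr (i := left) 0 hl (by omega)]
              exact mono left.toNat i (by omega) hi (by omega)
            have he2 : PySem.List.pyGetD arr right 0 = arr[j]'hj := by
              rw [PySem.List.pyGetD_eq_getElem arr (i := right) 0 (by omega) (by omega)]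
              congr 1; omega
            rw [he2] at hLt hNe
            omega
    · rw [if_neg h]
      constructor
      · intro hfalse; exact absurd hfalse (by simp)
      · rintro ⟨i, j, hi, hj, h1, h2, h3, -⟩; omega

theorem pvTwoPointer_iff (arr : List Int) (hs : arr.Pairwise (· ≤ ·)) (target : Int)
    (left right : Int) (hl : 0 ≤ left) (hr : right < (arr.length : Int)) :
    pvTwoPointer arr target left right = true ↔
      ∃ (i j : Nat) (hi : i < arr.length) (hj : j < arr.length),
        left ≤ (i : Int) ∧ i ≤ j ∧ (j : Int) ≤ right ∧ arr[i]'hi + arr[j]'hj = target :=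
  pvGo_iff arr hs target _ left right hl hr (Nat.le_refl _)

-- B returns true iff three (not necessarily distinct) values of l sum to t.
theorem pvB_iff (l : List Int) (t : Int) :
    has_three_sum_set_alt l t = true ↔ l ≠ [] ∧ ∃ x ∈ l, ∃ y ∈ l, ∃ z ∈ l, x + y + z = t := by
  simp only [has_three_sum_set_alt]
  split
  · rename_i hl
    set arr := PySem.List.sorted (PySem.Set.ofList l) (fun x => x) false with harr
    have hs : arr.Pairwise (· ≤ ·) := by
      have := PySem.List.sorted_ofList_pairwise_lt (xs := l)
      exact this.imp (fun h => le_of_lt h)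
    have hmem : ∀ a : Int, a ∈ arr ↔ a ∈ l := by
      intro a
      rw [harr, PySem.List.mem_sorted, PySem.Set.mem_ofList]
    simp only [List.any_eq_true]
    constructor
    · rintro ⟨x, hx, htp⟩
      rw [pvTwoPointer_iff arr hs _ _ _ (by omega) (by omega)] at htp
      rcases htp with ⟨i, j, hi, hj, -, -, -, hsum⟩
      refine ⟨hl, x, (hmem x).mp hx, arr[i]'hi, (hmem _).mp (arr.getElem_mem _),
        arr[j]'hj, (hmem _).mp (arr.getElem_mem _), by omega⟩
    · rintro ⟨-, x, hx, y, hy, z, hz, hsum⟩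
      refine ⟨x, (hmem x).mpr hx, ?_⟩
      rw [pvTwoPointer_iff arr hs _ _ _ (by omega) (by omega)]
      obtain ⟨i, hi, hiy⟩ := List.getElem_of_mem ((hmem y).mpr hy)
      obtain ⟨j, hj, hjz⟩ := List.getElem_of_mem ((hmem z).mpr hz)
      rcases le_or_gt i j with hij | hij
      · exact ⟨i, j, hi, hj, by omega, hij, by omega, by rw [hiy, hjz]; omega⟩
      · exact ⟨j, i, hj, hi, by omega, by omega, by omega, by rw [hjz, hiy]; omega⟩
  · rename_i hl
    simp at hl
    simp [hl]

-- ===== VERDICT (by name: the statement is the Claim_ definition above) =====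
theorem has_three_sum_set_spec : Claim_equal_has_three_sum_set := by
  intro l t _
  unfold Spec_has_three_sum_set
  have h : (has_three_sum_set l t = true) ↔ (has_three_sum_set_alt l t = true) := by
    rw [pvA_iff, pvB_iff]
  cases hB : has_three_sum_set_alt l t with
  | true => exact h.mpr hB
  | false =>
    rw [hB] at h
    simp only [Bool.false_eq_true, iff_false, Bool.not_eq_true] at h
    exact h
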